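-- pv_equiv track=rewrite | github.com/juspian/Coding-Test | 3진법 뒤집기.py | solution
-- ===== SOURCE A (Python) =====
-- def solution(n):
--     a=''
--     b=[]
--     while n//3!=0:
--         a+=str(n%3)
--         n//=3
--     a+=str(n)
--     a=a[::-1] # 3진법 변환
--     a=a[::-1] # 앞뒤 반전
--     i=0
--     while i<len(a):  # 10진법으로 표현
--         for j in range(len(a)-1,-1,-1):
--             b.append(int(a[i])*(3**j))
--             i+=1
--     return sum(b)
-- ===== SOURCE B (Python) =====
-- def solution(n):
--     # Horner evaluation of the LSB-first ternary digit list (= reversed ternary to decimal)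
--     digits = []
--     while n >= 3:
--         digits.append(n % 3)
--         n //= 3
--     digits.append(n)
--     result = 0
--     for d in digits:
--         result = result * 3 + d
--     return result
-- ===== Notes on version B (the rewrite author's own statement) =====
-- stated objective: simpler
-- what changed: B collects the ternary digits LSB-first into a list and evaluates the reversed number with a Horner accumulator (result=result*3+d), instead of building a digit string, reversing it twice, and summing explicit int(a[i])*3**j power terms from a nested while/for; A diverges on negative n (the while loop never terminates), so Pre_ requires 0 <= n.
import Mathlib
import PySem

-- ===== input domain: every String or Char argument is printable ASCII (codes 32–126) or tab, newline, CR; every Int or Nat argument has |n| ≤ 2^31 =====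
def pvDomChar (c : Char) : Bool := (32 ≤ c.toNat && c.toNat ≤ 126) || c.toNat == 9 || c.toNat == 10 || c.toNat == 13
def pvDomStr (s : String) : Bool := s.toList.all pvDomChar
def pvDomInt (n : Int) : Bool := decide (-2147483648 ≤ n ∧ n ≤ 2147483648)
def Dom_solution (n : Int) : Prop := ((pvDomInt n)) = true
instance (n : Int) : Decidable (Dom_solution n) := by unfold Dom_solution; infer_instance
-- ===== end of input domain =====

-- B replaces A's digit-string building, double reversal and explicit 3**j power sum
-- by a LSB-first digit list folded with a Horner accumulator (objective: simpler).

-- ===== PORT A =====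
-- while n//3 != 0: a += str(n%3); n //= 3   (fuel bounds the iterations; for 0 ≤ n
-- fuel = n.natAbs+1 is never exhausted, and at fuel 0 n must be 0, same result)
def solLoop1 (fuel : Nat) (n : Int) (a : List Char) : List Char × Int :=
  match fuel with
  | 0 => (a, n)
  | f+1 =>
    if PySem.Int.floordiv n 3 ≠ 0 then
      solLoop1 f (PySem.Int.floordiv n 3) (a ++ PySem.Int.toChars (PySem.Int.mod n 3))
    else (a, n)

-- int(a[i]) ; the .getD defaults are never hit on the admitted inputs (i is in range
-- and the char is a digit), where Python would raise
def valAt (a : List Char) (i : Int) : Int :=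
  (PySem.Int.ofChars? [((PySem.List.pyGet? a i).getD ' ')]).getD 0

-- for j in range(len(a)-1,-1,-1): b.append(int(a[i])*(3**j)); i += 1
def solInner (a : List Char) (bi : List Int × Int) : List Int × Int :=
  (PySem.List.pyRange ((a.length : Int) - 1) (-1) (-1)).foldl
    (fun s j => (s.1 ++ [valAt a s.2 * 3 ^ j.toNat], s.2 + 1)) bi

-- while i < len(a): <inner for>   (i jumps by len(a) each pass, so fuel len+1 suffices)
def solOuter (fuel : Nat) (a : List Char) (b : List Int) (i : Int) : List Int :=
  match fuel with
  | 0 => b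
  | f+1 =>
    if i < (a.length : Int) then
      let s := solInner a (b, i)
      solOuter f a s.1 s.2
    else b

def solution (n : Int) : Int :=
  let p := solLoop1 (n.natAbs + 1) n []
  let a := p.1 ++ PySem.Int.toChars p.2
  let a := (PySem.List.slice? a none none (-1)).getD []   -- a[::-1]
  let a := (PySem.List.slice? a none none (-1)).getD []   -- a[::-1]
  (solOuter (a.length + 1) a [] 0).sum

-- ===== PORT B =====
-- while n >= 3: digits.append(n%3); n //= 3   (same fuel convention as above)
def altLoop (fuel : Nat) (n : Int) (ds : List Int) : List Int × Int :=
  match fuel with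
  | 0 => (ds, n)
  | f+1 =>
    if n ≥ 3 then
      altLoop f (PySem.Int.floordiv n 3) (ds ++ [PySem.Int.mod n 3])
    else (ds, n)

def solution_alt (n : Int) : Int :=
  let p := altLoop (n.natAbs + 1) n []
  let digits := p.1 ++ [p.2]
  digits.foldl (fun r d => r * 3 + d) 0

-- ===== PRECONDITION & SPEC =====
-- A's while loop never terminates for n < 0 (n//3 stabilises at -1), so Pre_ excludes
-- exactly the negative inputs, on which Python A diverges and returns nothing.
def Pre_solution (n : Int) : Prop := 0 ≤ n
instance (n : Int) : Decidable (Pre_solution n) := by unfold Pre_solution; infer_instance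
def pvWitness_solution : Int := (45)

def Spec_solution (n : Int) (out : Int) : Prop := out = solution_alt n
instance (n : Int) (out : Int) : Decidable (Spec_solution n out) := by unfold Spec_solution; infer_instance

-- ===== CLAIM (what is proved, stated in full; the proofs are below) =====
def Claim_equal_solution : Prop := ∀ (n : Int), Dom_solution n → Pre_solution n → Spec_solution n (solution n)

-- ===== LEMMAS AND PROOFS =====

-- canonical LSB-first ternary digit list of a natural number
def pdig (n : Nat) : List Int :=
  if h : n < 3 then [(n : Int)] else ((n % 3 : Nat) : Int) :: pdig (n / 3)
decreasing_by exact Nat.div_lt_self (by omega) (by omega)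

-- digit → its character
def dc (d : Int) : Char := Char.ofNat (48 + d.toNat)

def horner (ds : List Int) : Int := ds.foldl (fun r d => r * 3 + d) 0

-- descending exponent list [m-1, ..., 0]
def descL : Nat → List Int
  | 0 => []
  | m+1 => (m : Int) :: descL m

def wsum (cs : List Char) : List Int → Int → Int
  | [], _ => 0
  | j :: js, i => valAt cs i * 3 ^ j.toNat + wsum cs js (i+1)

theorem pdig_bounds : ∀ n, ∀ d ∈ pdig n, 0 ≤ d ∧ d < 3 := by
  intro n
  induction n using pdig.induct with
  | case1 n h =>
    intro d hd
    rw [pdig, dif_pos h] at hd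
    simp at hd
    omega
  | case2 n h ih =>
    intro d hd
    rw [pdig, dif_neg h] at hd
    rcases List.mem_cons.mp hd with h1 | h1
    · subst h1; constructor <;> [positivity; exact_mod_cast Nat.mod_lt n (by omega)]
    · exact ih d h1

theorem toChars_digit (d : Int) (h0 : 0 ≤ d) (h3 : d < 3) :
    PySem.Int.toChars d = [dc d] := by
  interval_cases d <;> decide

theorem digit_val (d : Int) (h0 : 0 ≤ d) (h3 : d < 3) :
    PySem.Int.ofChars? [dc d] = some d := by
  interval_cases d <;> decide

theorem pdig_ne_nil (n : Nat) : pdig n ≠ [] := by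
  rw [pdig]
  split <;> simp

theorem pdig_small (m : Nat) (h : m < 3) : pdig m = [(m : Int)] := by
  rw [pdig, dif_pos h]

theorem pdig_cons (m : Nat) (h : ¬ m < 3) :
    pdig m = ((m % 3 : Nat) : Int) :: pdig (m / 3) := by
  rw [pdig, dif_neg h]

theorem altLoop_eq : ∀ fuel (n : Int) ds, 0 ≤ n → n < 3 ^ fuel →
    (altLoop fuel n ds).1 ++ [(altLoop fuel n ds).2] = ds ++ pdig n.toNat := by
  intro fuel
  induction fuel with
  | zero =>
    intro n ds h0 hlt
    have hn : n = 0 := by simp at hlt; omega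
    subst hn
    simp [altLoop, pdig_small 0 (by omega)]
  | succ f ih =>
    intro n ds h0 hlt
    have hdiv : n / 3 < 3 ^ f := by rw [pow_succ] at hlt; omega
    rw [altLoop]
    by_cases h3 : n ≥ 3
    · rw [if_pos h3]
      rw [PySem.Int.floordiv_eq_ediv_of_pos (by omega), PySem.Int.mod_eq_emod_of_pos (by omega)]
      rw [ih (n / 3) _ (by omega) hdiv]
      rw [List.append_assoc, pdig_cons n.toNat (by omega)]
      have e1 : ((n.toNat % 3 : Nat) : Int) = n % 3 := by omega
      have e2 : (n / 3).toNat = n.toNat / 3 := by omega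
      rw [e1, e2]
      rfl
    · rw [if_neg h3]
      simp only
      rw [pdig_small n.toNat (by omega)]
      have : ((n.toNat : Nat) : Int) = n := by omega
      rw [this]

theorem solLoop1_eq : ∀ fuel (n : Int) a, 0 ≤ n → n < 3 ^ fuel →
    (solLoop1 fuel n a).1 ++ PySem.Int.toChars (solLoop1 fuel n a).2
      = a ++ (pdig n.toNat).map dc := by
  intro fuel
  induction fuel with
  | zero =>
    intro n a h0 hlt
    have hn : n = 0 := by simp at hlt; omega
    subst hn
    simp [solLoop1, pdig_small 0 (by omega)]
    decide
  | succ f ih =>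
    intro n a h0 hlt
    have hdiv : n / 3 < 3 ^ f := by rw [pow_succ] at hlt; omega
    rw [solLoop1]
    rw [PySem.Int.floordiv_eq_ediv_of_pos (by omega : (0:Int) < 3),
        PySem.Int.mod_eq_emod_of_pos (by omega : (0:Int) < 3)]
    by_cases h3 : n / 3 ≠ 0
    · rw [if_pos h3]
      rw [ih (n / 3) _ (by omega) hdiv]
      rw [toChars_digit (n % 3) (by omega) (by omega), List.append_assoc,
          pdig_cons n.toNat (by omega), List.map_cons]
      have e1 : ((n.toNat % 3 : Nat) : Int) = n % 3 := by omega
      have e2 : (n / 3).toNat = n.toNat / 3 := by omega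
      rw [e1, e2]
      rfl
    · rw [if_neg h3]
      simp only
      rw [pdig_small n.toNat (by omega), List.map_singleton]
      have e : ((n.toNat : Nat) : Int) = n := by omega
      rw [e, toChars_digit n (by omega) (by omega)]

theorem horner_foldl (ds : List Int) (r : Int) :
    ds.foldl (fun r d => r * 3 + d) r = r * 3 ^ ds.length + horner ds := by
  induction ds generalizing r with
  | nil => simp [horner]
  | cons d ds ih =>
    simp only [List.foldl_cons, List.length_cons, horner] at *
    rw [ih (r * 3 + d), ih (0 * 3 + d)]
    ring

theorem inner_fold (cs : List Char) : ∀ (js : List Int) (b : List Int) (i : Int),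
    (js.foldl (fun s j => (s.1 ++ [valAt cs s.2 * 3 ^ j.toNat], s.2 + 1)) (b, i)).1.sum
        = b.sum + wsum cs js i
    ∧ (js.foldl (fun s j => (s.1 ++ [valAt cs s.2 * 3 ^ j.toNat], s.2 + 1)) (b, i)).2
        = i + js.length := by
  intro js
  induction js with
  | nil => intro b i; simp [wsum]
  | cons j js ih =>
    intro b i
    simp only [List.foldl_cons, wsum, List.length_cons]
    refine ⟨?_, ?_⟩
    · rw [(ih (b ++ [valAt cs i * 3 ^ j.toNat]) (i + 1)).1]
      simp
      ring
    · rw [(ih (b ++ [valAt cs i * 3 ^ j.toNat]) (i + 1)).2]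
      push_cast
      ring

theorem descL_rev (m : Nat) :
    ((List.range m).map (fun (k : Nat) => (0 : Int) + (k : Int))).reverse = descL m := by
  induction m with
  | zero => simp [descL]
  | succ k ih =>
    rw [List.range_succ, List.map_append, List.reverse_append, descL, ← ih]
    simp

theorem descL_eq (m : Nat) :
    PySem.List.pyRange ((m : Int) - 1) (-1) (-1) = descL m := by
  rw [PySem.List.pyRange_neg_one_eq_reverse]
  have h : (-1 : Int) + 1 = 0 := by omega
  have h2 : (m : Int) - 1 + 1 = (m : Int) := by omega
  rw [h, h2, PySem.List.pyRange_one]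
  have h3 : ((m : Int) - 0).toNat = m := by omega
  rw [h3, descL_rev]

theorem wsum_desc : ∀ (ds pre : List Int), (∀ d ∈ ds, 0 ≤ d ∧ d < 3) →
    wsum ((pre ++ ds).map dc) (descL ds.length) (pre.length) = horner ds := by
  intro ds
  induction ds with
  | nil => intro pre h; simp [descL, wsum, horner]
  | cons d ds ih =>
    intro pre h
    simp only [List.length_cons, descL, wsum, Int.toNat_natCast]
    have hd := h d (by simp)
    have hval : valAt ((pre ++ d :: ds).map dc) ((pre.length : Nat) : Int) = d := by
      unfold valAt
      rw [PySem.List.pyGet?_natCast]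
      rw [List.getElem?_map, List.getElem?_append_right (by simp)]
      simp only [Nat.sub_self, List.getElem?_cons_zero, Option.map_some, Option.getD_some]
      rw [digit_val d hd.1 hd.2]
      rfl
    rw [hval]
    have hih := ih (pre ++ [d]) (fun x hx => h x (by simp [hx]))
    rw [List.append_assoc] at hih
    simp only [List.singleton_append, List.length_append, List.length_cons,
      List.length_nil] at hih
    have e : ((pre.length + 1 : Nat) : Int) = (pre.length : Int) + 1 := by omega
    rw [e] at hih
    rw [hih]
    have hcons : horner (d :: ds) = d * 3 ^ ds.length + horner ds := by
      simp only [horner, List.foldl_cons, zero_mul, zero_add]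
      exact horner_foldl ds d
    rw [hcons]

theorem lt_pow_fuel (n : Int) (h : 0 ≤ n) : n < 3 ^ (n.natAbs + 1) := by
  have h1 : n.natAbs < 3 ^ n.natAbs :=
    Nat.lt_pow_self (by omega)
  have h2 : 3 ^ n.natAbs ≤ 3 ^ (n.natAbs + 1) := Nat.pow_le_pow_right (by omega) (by omega)
  calc n = (n.natAbs : Int) := by omega
    _ < ((3 ^ (n.natAbs + 1) : Nat) : Int) := by exact_mod_cast Nat.lt_of_lt_of_le h1 h2
    _ = 3 ^ (n.natAbs + 1) := by push_cast; ring

theorem descL_length (m : Nat) : (descL m).length = m := by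
  induction m with
  | zero => rfl
  | succ k ih => simp [descL, ih]

theorem solOuter_stop (f : Nat) (a : List Char) (b : List Int) (i : Int)
    (h : ¬ i < (a.length : Int)) : solOuter f a b i = b := by
  cases f with
  | zero => rfl
  | succ f => rw [solOuter, if_neg h]

theorem outer_sum (ds : List Int) (hne : ds ≠ []) (hb : ∀ d ∈ ds, 0 ≤ d ∧ d < 3) :
    (solOuter ((ds.map dc).length + 1) (ds.map dc) [] 0).sum = horner ds := by
  set cs := ds.map dc with hcs
  have hL : cs.length = ds.length := by simp [hcs]
  have hpos : 0 < cs.length := by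
    cases ds with
    | nil => exact absurd rfl hne
    | cons a l => simp [hcs]
  have hinner := inner_fold cs (PySem.List.pyRange ((cs.length : Int) - 1) (-1) (-1)) [] 0
  have hjs : PySem.List.pyRange ((cs.length : Int) - 1) (-1) (-1) = descL cs.length :=
    descL_eq cs.length
  rw [solOuter, if_pos (by exact_mod_cast hpos)]
  simp only [solInner]
  rw [hinner.2]
  rw [solOuter_stop _ _ _ _ (by rw [hjs, descL_length]; omega)]
  rw [hinner.1, hjs]
  have hw := wsum_desc ds [] hb
  simp only [List.nil_append, List.length_nil, Nat.cast_zero] at hw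
  simp only [List.sum_nil, zero_add, hL]
  rw [hcs]
  exact hw

theorem solution_eq_horner (n : Int) (h : 0 ≤ n) :
    solution n = horner (pdig n.toNat) := by
  have hsl := solLoop1_eq (n.natAbs + 1) n [] h (lt_pow_fuel n h)
  rw [List.nil_append] at hsl
  simp only [solution, PySem.List.slice?_none_none_neg_one, Option.getD_some,
    List.reverse_reverse]
  rw [hsl]
  exact outer_sum (pdig n.toNat) (pdig_ne_nil _) (pdig_bounds _)

theorem alt_eq_horner (n : Int) (h : 0 ≤ n) :
    solution_alt n = horner (pdig n.toNat) := by
  simp only [solution_alt]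
  rw [altLoop_eq (n.natAbs + 1) n [] h (lt_pow_fuel n h), List.nil_append]
  rfl

-- ===== VERDICT (by name: the statement is the Claim_ definition above) =====
theorem solution_spec : Claim_equal_solution := by
  intro n _ hpre
  unfold Spec_solution
  rw [solution_eq_horner n hpre, alt_eq_horner n hpre]
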